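-- pv_equiv track=rewrite | github.com/serweryn617/AoC | year23/day14/puzzle.py | roll_row
-- ===== SOURCE A (Python) =====
-- SOLID = '#'
--
-- ROUND = 'O'
--
-- EMPTY = '.'
--
-- def roll_row(row):
--     ranges = row.split(SOLID)
--     rolled_ranges = []
--
--     for r in ranges:
--         num_stones = r.count(ROUND)
--         num_empty = len(r) - num_stones
--         rolled_ranges.append(ROUND * num_stones + EMPTY * num_empty)
--
--     return SOLID.join(rolled_ranges)
-- ===== SOURCE B (Python) =====
-- def roll_row(row):
--     parts = []
--     stones = 0
--     empties = 0
--     for ch in row: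
--         if ch == '#':
--             parts.append('O' * stones + '.' * empties + '#')
--             stones = 0
--             empties = 0
--         elif ch == 'O':
--             stones += 1
--         else:
--             empties += 1
--     parts.append('O' * stones + '.' * empties)
--     return ''.join(parts)
-- ===== Notes on version B (the rewrite author's own statement) =====
-- stated objective: simpler
-- what changed: One left-to-right pass keeping stone/empty counters per segment, flushing at each divider, instead of splitting on the divider, counting per segment, and joining.
import Mathlib
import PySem

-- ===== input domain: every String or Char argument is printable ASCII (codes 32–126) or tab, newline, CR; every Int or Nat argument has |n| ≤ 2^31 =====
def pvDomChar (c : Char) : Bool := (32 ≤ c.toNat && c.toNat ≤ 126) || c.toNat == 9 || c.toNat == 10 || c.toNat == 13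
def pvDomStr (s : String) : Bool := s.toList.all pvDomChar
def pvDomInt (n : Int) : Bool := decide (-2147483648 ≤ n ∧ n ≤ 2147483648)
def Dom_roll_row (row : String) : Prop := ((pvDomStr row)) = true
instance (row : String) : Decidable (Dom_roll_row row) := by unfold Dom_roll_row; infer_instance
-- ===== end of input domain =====

-- B replaces A's split/count/join decomposition by one pass with per-segment stone/empty counters (simpler decomposition, same cost).

-- ===== PORT A =====
def roll_row (row : String) : String :=
  let ranges := PySem.Chars.splitOn row.toList ['#']
  let rolled_ranges := ranges.foldl (fun acc r =>
    let num_stones : Nat := PySem.Chars.count r ['O']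
    let num_empty : Int := (PySem.Chars.len r : Int) - (num_stones : Int)
    acc ++ [PySem.List.pyRepeat ['O'] (num_stones : Int) ++ PySem.List.pyRepeat ['.'] num_empty]) []
  String.ofList (PySem.Chars.join ['#'] rolled_ranges)

-- ===== PORT B =====
def roll_row_alt (row : String) : String :=
  let st := row.toList.foldl (fun (st : List Char × Nat × Nat) ch =>
    if ch = '#' then
      (st.1 ++ List.replicate st.2.1 'O' ++ List.replicate st.2.2 '.' ++ ['#'], 0, 0)
    else if ch = 'O' then (st.1, st.2.1 + 1, st.2.2)
    else (st.1, st.2.1, st.2.2 + 1)) ([], 0, 0)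
  String.ofList (st.1 ++ List.replicate st.2.1 'O' ++ List.replicate st.2.2 '.')

-- ===== PRECONDITION & SPEC =====
def Spec_roll_row (row : String) (out : String) : Prop := out = roll_row_alt row
instance (row : String) (out : String) : Decidable (Spec_roll_row row out) := by unfold Spec_roll_row; infer_instance

-- ===== CLAIM (what is proved, stated in full; the proofs are below) =====
def Claim_equal_roll_row : Prop := ∀ (row : String), Dom_roll_row row → Spec_roll_row row (roll_row row)

-- ===== LEMMAS AND PROOFS =====

-- structural single-char split (proof-side model of A's row.split('#'))
def sp : List Char → List (List Char)
  | [] => [[]]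
  | c :: cs => if c = '#' then [] :: sp cs
               else match sp cs with
                    | [] => [[c]]
                    | s :: r => (c :: s) :: r

-- proof-side model of A's per-segment rendering
def render (r : List Char) : List Char :=
  List.replicate (r.count 'O') 'O' ++ List.replicate (r.length - r.count 'O') '.'

-- proof-side recursive form of B's loop
def bGo : List Char → Nat → Nat → List Char
  | [], s, e => List.replicate s 'O' ++ List.replicate e '.'
  | c :: cs, s, e =>
    if c = '#' then List.replicate s 'O' ++ List.replicate e '.' ++ '#' :: bGo cs 0 0
    else if c = 'O' then bGo cs (s + 1) e
    else bGo cs s (e + 1)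

lemma sp_ne_nil (cs : List Char) : sp cs ≠ [] := by
  cases cs with
  | nil => simp [sp]
  | cons c cs =>
    simp only [sp]
    split
    · simp
    · split <;> simp

lemma count_go_eq (cs : List Char) : ∀ fuel acc, cs.length ≤ fuel →
    PySem.Chars.count.go ['O'] fuel cs acc = acc + cs.count 'O' := by
  induction cs with
  | nil => intro fuel acc _; cases fuel <;> simp [PySem.Chars.count.go]
  | cons c cs ih =>
    intro fuel acc h
    cases fuel with
    | zero => simp at h
    | succ f =>
      simp only [PySem.Chars.count.go]
      by_cases hc : c = 'O'
      · subst hc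
        simp only [List.isPrefixOf, List.length_cons] at *
        simp [ih f (acc + 1) (by omega)]
        omega
      · have hpre : List.isPrefixOf ['O'] (c :: cs) = false := by
          simp [List.isPrefixOf]; exact fun h' => (hc h'.symm).elim
        simp only [hpre, Bool.false_eq_true, if_false]
        rw [ih f acc (by simpa using Nat.le_of_succ_le_succ h)]
        rw [List.count_cons]
        simp [hc]

lemma count_eq (cs : List Char) : PySem.Chars.count cs ['O'] = cs.count 'O' := by
  simp only [PySem.Chars.count, List.isEmpty]
  rw [count_go_eq cs cs.length 0 le_rfl]
  simp

lemma split_go_eq (cs : List Char) : ∀ fuel cur acc, cs.length < fuel →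
    PySem.Chars.splitOn.go ['#'] fuel cs cur acc
      = acc.reverse ++ (sp cs).modifyHead (fun s => cur.reverse ++ s) := by
  induction cs with
  | nil =>
    intro fuel cur acc h
    cases fuel with
    | zero => omega
    | succ f => simp [PySem.Chars.splitOn.go, sp]
  | cons c cs ih =>
    intro fuel cur acc h
    cases fuel with
    | zero => omega
    | succ f =>
      simp only [PySem.Chars.splitOn.go]
      by_cases hc : c = '#'
      · subst hc
        have hp : List.isPrefixOf ['#'] ('#' :: cs) = true := by simp [List.isPrefixOf]
        simp only [hp, if_true, List.length_cons, List.drop_succ_cons, List.length_nil, List.drop_zero]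
        rw [ih f [] (cur.reverse :: acc) (by simpa using Nat.lt_of_succ_lt_succ h)]
        simp only [sp, List.reverse_cons, List.reverse_nil, List.nil_append, List.append_assoc]
        cases hsp : sp cs <;> simp
      · have hp : List.isPrefixOf ['#'] (c :: cs) = false := by
          simp [List.isPrefixOf]; exact fun h' => (hc h'.symm).elim
        simp only [hp, Bool.false_eq_true, if_false]
        rw [ih f (c :: cur) acc (by simpa using Nat.lt_of_succ_lt_succ h)]
        simp only [sp, hc, if_false]
        rcases hsp : sp cs with _ | ⟨s, r⟩
        · exact absurd hsp (sp_ne_nil cs)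
        · simp

lemma splitOn_eq_sp (cs : List Char) : PySem.Chars.splitOn cs ['#'] = sp cs := by
  rw [PySem.Chars.splitOn, split_go_eq cs (cs.length + 1) [] [] (by omega)]
  rcases hsp : sp cs with _ | ⟨s, r⟩
  · exact absurd hsp (sp_ne_nil cs)
  · simp

lemma bGo_eq (cs : List Char) : ∀ s e seg rest, sp cs = seg :: rest →
    bGo cs s e = List.replicate (s + seg.count 'O') 'O'
      ++ List.replicate (e + (seg.length - seg.count 'O')) '.'
      ++ rest.flatMap (fun r => '#' :: render r) := by
  induction cs with
  | nil =>
    intro s e seg rest h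
    simp only [sp] at h
    cases h
    simp [bGo]
  | cons c cs ih =>
    intro s e seg rest h
    by_cases hc : c = '#'
    · subst hc
      simp only [sp, if_true] at h
      cases h
      rcases hsp : sp cs with _ | ⟨s0, r0⟩
      · exact absurd hsp (sp_ne_nil cs)
      simp only [bGo, if_true]
      rw [ih 0 0 s0 r0 hsp]
      simp [render]
    · rcases hsp : sp cs with _ | ⟨s0, r0⟩
      · exact absurd hsp (sp_ne_nil cs)
      simp only [sp, hc, if_false, hsp] at h
      injection h with h1 h2
      subst h1; subst h2
      have hcount : s0.count 'O' ≤ s0.length := List.count_le_length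
      by_cases ho : c = 'O'
      · subst ho
        simp only [bGo, hc, if_false]
        rw [ih (s + 1) e s0 r0 hsp]
        rw [List.count_cons_self, List.length_cons]
        have e1 : s + 1 + s0.count 'O' = s + (s0.count 'O' + 1) := by omega
        have e2 : s0.length + 1 - (s0.count 'O' + 1) = s0.length - s0.count 'O' := by omega
        rw [e1, e2]
        simp
      · simp only [bGo, hc, ho, if_false]
        rw [ih s (e + 1) s0 r0 hsp]
        have h1 : (c :: s0).count 'O' = s0.count 'O' := by
          rw [List.count_cons]; simp [ho]
        rw [h1, List.length_cons]
        have e2 : e + 1 + (s0.length - s0.count 'O') = e + (s0.length + 1 - s0.count 'O') := by omega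
        rw [e2]


lemma join_render (seg : List Char) (rest : List (List Char)) :
    PySem.Chars.join ['#'] ((seg :: rest).map render)
      = render seg ++ rest.flatMap (fun r => '#' :: render r) := by
  induction rest generalizing seg with
  | nil => simp [PySem.Chars.join, List.intercalate]
  | cons r rs ih =>
    have hstep : List.intercalate ['#'] (render seg :: render r :: rs.map render)
        = render seg ++ ['#'] ++ List.intercalate ['#'] (render r :: rs.map render) := by
      simp [List.intercalate, List.intersperse]
    simp only [List.map_cons, PySem.Chars.join] at *
    rw [hstep, ih]
    simp

-- A's loop body produces exactly `render`
lemma body_eq_render (r : List Char) :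
    PySem.List.pyRepeat ['O'] ((PySem.Chars.count r ['O'] : Nat) : Int)
      ++ PySem.List.pyRepeat ['.'] ((PySem.Chars.len r : Int) - ((PySem.Chars.count r ['O'] : Nat) : Int))
      = render r := by
  rw [PySem.List.pyRepeat_singleton, PySem.List.pyRepeat_singleton, count_eq, render]
  have hcount : r.count 'O' ≤ r.length := List.count_le_length
  have h1 : ((r.count 'O' : Nat) : Int).toNat = r.count 'O' := by omega
  have h2 : ((PySem.Chars.len r : Int) - ((r.count 'O' : Nat) : Int)).toNat
      = r.length - r.count 'O' := by
    simp only [PySem.Chars.len_eq]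
    omega
  rw [h1, h2]

-- B's fold with explicit state equals the recursive bGo
lemma foldl_eq_bGo (cs : List Char) : ∀ (out : List Char) (s e : Nat),
    (let st := cs.foldl (fun (st : List Char × Nat × Nat) ch =>
        if ch = '#' then
          (st.1 ++ List.replicate st.2.1 'O' ++ List.replicate st.2.2 '.' ++ ['#'], 0, 0)
        else if ch = 'O' then (st.1, st.2.1 + 1, st.2.2)
        else (st.1, st.2.1, st.2.2 + 1)) (out, s, e)
     st.1 ++ List.replicate st.2.1 'O' ++ List.replicate st.2.2 '.')
    = out ++ bGo cs s e := by
  induction cs with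
  | nil => intro out s e; simp [bGo]
  | cons c cs ih =>
    intro out s e
    by_cases hc : c = '#'
    · subst hc
      simp only [List.foldl_cons, if_pos rfl]
      rw [ih]
      simp [bGo]
    · by_cases ho : c = 'O'
      · subst ho
        simp only [List.foldl_cons, hc, if_false]
        rw [ih]
        simp [bGo]
      · simp only [List.foldl_cons, hc, ho, if_false]
        rw [ih]
        simp [bGo, hc, ho]

-- ===== VERDICT (by name: the statement is the Claim_ definition above) =====
theorem roll_row_spec : Claim_equal_roll_row := by
  intro row _
  unfold Spec_roll_row
  have hA : roll_row row = String.ofList (PySem.Chars.join ['#']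
      ((PySem.Chars.splitOn row.toList ['#']).foldl (fun acc r =>
        acc ++ [PySem.List.pyRepeat ['O'] ((PySem.Chars.count r ['O'] : Nat) : Int)
          ++ PySem.List.pyRepeat ['.'] ((PySem.Chars.len r : Int)
            - ((PySem.Chars.count r ['O'] : Nat) : Int))]) [])) := rfl
  have hB : roll_row_alt row = String.ofList
      ((fun (st : List Char × Nat × Nat) =>
          st.1 ++ List.replicate st.2.1 'O' ++ List.replicate st.2.2 '.')
        (row.toList.foldl (fun (st : List Char × Nat × Nat) ch =>
          if ch = '#' then
            (st.1 ++ List.replicate st.2.1 'O' ++ List.replicate st.2.2 '.' ++ ['#'], 0, 0)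
          else if ch = 'O' then (st.1, st.2.1 + 1, st.2.2)
          else (st.1, st.2.1, st.2.2 + 1)) ([], 0, 0))) := rfl
  rw [hA, hB]
  rw [PySem.List.foldl_append_singleton_eq_map]
  simp only [List.nil_append]
  have hmap : (PySem.Chars.splitOn row.toList ['#']).map (fun r =>
      PySem.List.pyRepeat ['O'] ((PySem.Chars.count r ['O'] : Nat) : Int)
        ++ PySem.List.pyRepeat ['.'] ((PySem.Chars.len r : Int) - ((PySem.Chars.count r ['O'] : Nat) : Int)))
      = (sp row.toList).map render := by
    rw [splitOn_eq_sp]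
    exact List.map_congr_left (fun r _ => body_eq_render r)
  rw [hmap]
  rw [foldl_eq_bGo row.toList [] 0 0]
  rcases hsp : sp row.toList with _ | ⟨seg, rest⟩
  · exact absurd hsp (sp_ne_nil row.toList)
  rw [join_render, bGo_eq row.toList 0 0 seg rest hsp]
  simp [render]
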